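-- pv_equiv track=rewrite | github.com/dl1rich/api-security-tester | backend/src/api/routes/reports.py | _assess_exploitability
-- ===== SOURCE A (Python) =====
-- def _assess_exploitability(vulnerabilities: list) -> str:
--     """Assess overall exploitability of vulnerabilities."""
--     if not vulnerabilities:
--         return "None"
--
--     critical_high = [v for v in vulnerabilities if v.get("severity") in ["critical", "high"]]
--     if len(critical_high) > 0:
--         return "High"
--     elif len([v for v in vulnerabilities if v.get("severity") == "medium"]) > 0:
--         return "Medium"
--     else:
--         return "Low"
-- ===== SOURCE B (Python) =====
-- _RANK = {"critical": 2, "high": 2, "medium": 1}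
--
-- def _assess_exploitability(vulnerabilities: list) -> str:
--     """Assess overall exploitability of vulnerabilities."""
--     if not vulnerabilities:
--         return "None"
--     level = max(_RANK.get(v.get("severity"), 0) for v in vulnerabilities)
--     if level == 2:
--         return "High"
--     if level == 1:
--         return "Medium"
--     return "Low"
-- ===== Notes on version B (the rewrite author's own statement) =====
-- stated objective: simpler
-- what changed: Replaced the two full-list filter comprehensions and the branch chain by a single max-reduction over a severity rank table, classified once at the end.
import Mathlib
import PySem

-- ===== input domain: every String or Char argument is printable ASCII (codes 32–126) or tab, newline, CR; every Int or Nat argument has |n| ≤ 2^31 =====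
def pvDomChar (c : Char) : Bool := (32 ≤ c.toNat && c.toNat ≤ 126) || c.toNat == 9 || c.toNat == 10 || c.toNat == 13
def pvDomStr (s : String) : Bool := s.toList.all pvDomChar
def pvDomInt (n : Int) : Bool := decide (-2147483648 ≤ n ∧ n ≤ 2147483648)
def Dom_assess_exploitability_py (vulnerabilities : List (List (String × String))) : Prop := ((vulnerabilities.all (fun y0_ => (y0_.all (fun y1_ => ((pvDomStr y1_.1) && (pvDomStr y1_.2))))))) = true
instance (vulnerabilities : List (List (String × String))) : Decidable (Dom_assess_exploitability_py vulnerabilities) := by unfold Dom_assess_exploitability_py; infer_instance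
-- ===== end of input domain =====

-- B replaces A's two filter passes by one max-reduction over a severity rank table (simpler decomposition).
-- ===== PORT A =====
def assess_exploitability_py (vulnerabilities : List (List (String × String))) : String :=
  if vulnerabilities = [] then "None"
  else
    let critical_high := vulnerabilities.filter (fun v =>
      match PySem.Dict.get? (PySem.Dict.mk v) "severity" with
      | some s => s == "critical" || s == "high"
      | none => false)
    if critical_high.length > 0 then "High"
    else if (vulnerabilities.filter (fun v =>
        PySem.Dict.get? (PySem.Dict.mk v) "severity" == some "medium")).length > 0 then "Medium"
    else "Low"

-- ===== PORT B =====
def pvRank : List (String × Nat) := [("critical", 2), ("high", 2), ("medium", 1)]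

def pvRankOf (v : List (String × String)) : Nat :=
  match PySem.Dict.get? (PySem.Dict.mk v) "severity" with
  | some s => PySem.Dict.getD (PySem.Dict.mk pvRank) s 0
  | none => 0

def assess_exploitability_py_alt (vulnerabilities : List (List (String × String))) : String :=
  if vulnerabilities = [] then "None"
  else
    let level := vulnerabilities.foldl (fun a v => max a (pvRankOf v)) 0
    if level = 2 then "High"
    else if level = 1 then "Medium"
    else "Low"

-- ===== PRECONDITION & SPEC =====
def Spec_assess_exploitability_py (vulnerabilities : List (List (String × String))) (out : String) : Prop := out = assess_exploitability_py_alt vulnerabilities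
instance (vulnerabilities : List (List (String × String))) (out : String) : Decidable (Spec_assess_exploitability_py vulnerabilities out) := by unfold Spec_assess_exploitability_py; infer_instance

-- ===== CLAIM (what is proved, stated in full; the proofs are below) =====
def Claim_equal_assess_exploitability_py : Prop := ∀ (vulnerabilities : List (List (String × String))), Dom_assess_exploitability_py vulnerabilities → Spec_assess_exploitability_py vulnerabilities (assess_exploitability_py vulnerabilities)

-- ===== LEMMAS AND PROOFS =====

def pvMaxRank (l : List (List (String × String))) : Nat :=
  match l with
  | [] => 0
  | v :: t => max (pvRankOf v) (pvMaxRank t)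

lemma foldl_max_eq (l : List (List (String × String))) (acc : Nat) :
    l.foldl (fun a v => max a (pvRankOf v)) acc = max acc (pvMaxRank l) := by
  induction l generalizing acc with
  | nil => simp [pvMaxRank]
  | cons v t ih => simp [List.foldl, pvMaxRank, ih, Nat.max_assoc]

def pvIsCH (v : List (String × String)) : Bool :=
  match PySem.Dict.get? (PySem.Dict.mk v) "severity" with
  | some s => s == "critical" || s == "high"
  | none => false

def pvIsMed (v : List (String × String)) : Bool :=
  PySem.Dict.get? (PySem.Dict.mk v) "severity" == some "medium"

lemma rank_eq (v : List (String × String)) :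
    pvRankOf v = if pvIsCH v then 2 else if pvIsMed v then 1 else 0 := by
  unfold pvRankOf pvIsCH pvIsMed
  cases h : PySem.Dict.get? (PySem.Dict.mk v) "severity" with
  | none => simp
  | some s =>
    by_cases hc : s = "critical"
    · subst hc; decide
    · by_cases hh : s = "high"
      · subst hh; decide
      · by_cases hm : s = "medium"
        · subst hm; decide
        · simp [pvRank, PySem.Dict.getD, Ne.symm hc, Ne.symm hh, Ne.symm hm,
                PySem.Dict.get?, hc, hh, hm]

lemma maxRank_char (l : List (List (String × String))) :
    pvMaxRank l =
      if (l.filter pvIsCH).length > 0 then 2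
      else if (l.filter pvIsMed).length > 0 then 1
      else 0 := by
  induction l with
  | nil => simp [pvMaxRank]
  | cons v t ih =>
    simp only [pvMaxRank, ih, rank_eq v, List.filter_cons]
    by_cases hc : pvIsCH v <;> by_cases hm : pvIsMed v <;>
      simp [hc, hm] <;> split_ifs <;> omega

-- ===== VERDICT (by name: the statement is the Claim_ definition above) =====
theorem assess_exploitability_py_spec : Claim_equal_assess_exploitability_py := by
  intro vs _
  unfold Spec_assess_exploitability_py assess_exploitability_py assess_exploitability_py_alt
  by_cases h : vs = []
  · simp [h]
  · simp only [h, if_false]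
    rw [foldl_max_eq, Nat.zero_max, maxRank_char]
    show (if (vs.filter pvIsCH).length > 0 then "High"
          else if (vs.filter pvIsMed).length > 0 then "Medium" else "Low") =
         (if (if (vs.filter pvIsCH).length > 0 then 2
              else if (vs.filter pvIsMed).length > 0 then 1 else (0 : Nat)) = 2 then "High"
          else if (if (vs.filter pvIsCH).length > 0 then 2
              else if (vs.filter pvIsMed).length > 0 then 1 else (0 : Nat)) = 1 then "Medium"
          else "Low")
    by_cases h1 : (vs.filter pvIsCH).length > 0 <;>
      by_cases h2 : (vs.filter pvIsMed).length > 0 <;> simp [h1, h2]
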